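-- pv_equiv track=rewrite | github.com/jenshwetakc/embrancing_dark_side | chromaeye/baseline/axe_devtool/axedev.py | _sum_counts_pagewise
-- ===== SOURCE A (Python) =====
-- from typing import Any, Dict, List, Optional, Set, Tuple
--
-- def _sum_counts_pagewise(cons_by_key: Dict[str, dict]) -> dict:
--     totals = {
--         "consistent_issue": 0,
--         "inconsistent_light_issue": 0,
--         "inconsistent_dark_issue": 0,
--         "rule_mismatch_issue": 0,
--         "pages_with_inconsistency": 0
--     }
--     for key, cons in cons_by_key.items():
--         c = cons.get("counts", {}) or {}
--         inc_sum = int(c.get("inconsistent_light", 0)) + int(c.get("inconsistent_dark", 0)) + int(c.get("rule_mismatch_issue", 0))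
--         if inc_sum > 0:
--             totals["pages_with_inconsistency"] += 1
--         totals["consistent_issue"]          += int(c.get("consistent", 0))
--         totals["inconsistent_light_issue"]  += int(c.get("inconsistent_light", 0))
--         totals["inconsistent_dark_issue"]   += int(c.get("inconsistent_dark", 0))
--         totals["rule_mismatch_issue"]       += int(c.get("rule_mismatch_issue", 0))
--     return totals
-- ===== SOURCE B (Python) =====
-- def _sum_counts_pagewise(cons_by_key):
--     pages = list(cons_by_key.values())
--
--     def counts_of(cons):
--         return cons.get("counts", {}) or {}
--
--     def field(name):
--         return sum(int(counts_of(cons).get(name, 0)) for cons in pages)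
--
--     def inc_of(cons):
--         c = counts_of(cons)
--         return (int(c.get("inconsistent_light", 0))
--                 + int(c.get("inconsistent_dark", 0))
--                 + int(c.get("rule_mismatch_issue", 0)))
--
--     return {
--         "consistent_issue": field("consistent"),
--         "inconsistent_light_issue": field("inconsistent_light"),
--         "inconsistent_dark_issue": field("inconsistent_dark"),
--         "rule_mismatch_issue": field("rule_mismatch_issue"),
--         "pages_with_inconsistency": sum(1 for cons in pages if inc_of(cons) > 0),
--     }
-- ===== Notes on version B (the rewrite author's own statement) =====
-- stated objective: alternative
-- what changed: Replaces A's single fused loop that mutates a running totals dict with five independent per-field passes (sum/count comprehensions over the pages), building the result dict directly from the five totals.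
import Mathlib
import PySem

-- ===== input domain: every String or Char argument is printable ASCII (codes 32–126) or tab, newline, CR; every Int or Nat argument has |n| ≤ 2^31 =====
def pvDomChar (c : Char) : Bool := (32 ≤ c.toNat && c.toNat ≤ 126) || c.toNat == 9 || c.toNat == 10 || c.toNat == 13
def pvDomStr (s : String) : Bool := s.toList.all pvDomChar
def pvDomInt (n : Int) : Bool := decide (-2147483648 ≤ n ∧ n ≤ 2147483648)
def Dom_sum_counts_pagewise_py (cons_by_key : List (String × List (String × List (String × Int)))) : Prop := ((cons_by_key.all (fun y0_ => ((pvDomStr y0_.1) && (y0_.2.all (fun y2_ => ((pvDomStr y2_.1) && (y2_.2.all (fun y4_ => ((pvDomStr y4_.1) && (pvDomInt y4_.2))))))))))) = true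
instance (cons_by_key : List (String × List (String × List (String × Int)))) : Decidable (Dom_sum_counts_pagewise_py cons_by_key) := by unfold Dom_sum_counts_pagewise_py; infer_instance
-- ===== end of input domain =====

-- B replaces A's single fused accumulation loop over a mutable totals dict by five
-- independent per-field passes (sum/count) over the pages; return value only, no speed claim.

-- ===== PORT A =====
-- c = cons.get("counts", {}) or {}  (a falsy — i.e. empty — dict is replaced by {})
def pvStepA (totals : PySem.Dict String Int)
    (kv : String × List (String × List (String × Int))) : PySem.Dict String Int :=
  let c0 := PySem.Dict.getD (PySem.Dict.mk kv.2) "counts" []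
  let c : PySem.Dict String Int := PySem.Dict.mk (if c0.isEmpty then [] else c0)
  let incSum := PySem.Dict.getD c "inconsistent_light" 0 + PySem.Dict.getD c "inconsistent_dark" 0
      + PySem.Dict.getD c "rule_mismatch_issue" 0
  let t1 := if incSum > 0 then
      PySem.Dict.insert totals "pages_with_inconsistency"
        (PySem.Dict.getD totals "pages_with_inconsistency" 0 + 1)
    else totals
  let t2 := PySem.Dict.insert t1 "consistent_issue"
      (PySem.Dict.getD t1 "consistent_issue" 0 + PySem.Dict.getD c "consistent" 0)
  let t3 := PySem.Dict.insert t2 "inconsistent_light_issue"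
      (PySem.Dict.getD t2 "inconsistent_light_issue" 0 + PySem.Dict.getD c "inconsistent_light" 0)
  let t4 := PySem.Dict.insert t3 "inconsistent_dark_issue"
      (PySem.Dict.getD t3 "inconsistent_dark_issue" 0 + PySem.Dict.getD c "inconsistent_dark" 0)
  PySem.Dict.insert t4 "rule_mismatch_issue"
      (PySem.Dict.getD t4 "rule_mismatch_issue" 0 + PySem.Dict.getD c "rule_mismatch_issue" 0)

def sum_counts_pagewise_py (cons_by_key : List (String × List (String × List (String × Int)))) : List (String × Int) :=
  (cons_by_key.foldl pvStepA
    (PySem.Dict.mk [("consistent_issue", 0), ("inconsistent_light_issue", 0),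
      ("inconsistent_dark_issue", 0), ("rule_mismatch_issue", 0),
      ("pages_with_inconsistency", 0)])).items

-- ===== PORT B =====
def pvCountsOf (cons : List (String × List (String × Int))) : PySem.Dict String Int :=
  let c0 := PySem.Dict.getD (PySem.Dict.mk cons) "counts" []
  PySem.Dict.mk (if c0.isEmpty then [] else c0)

def pvField (pages : List (List (String × List (String × Int)))) (name : String) : Int :=
  (pages.map (fun cons => PySem.Dict.getD (pvCountsOf cons) name 0)).sum

def pvIncOf (cons : List (String × List (String × Int))) : Int :=
  let c := pvCountsOf cons
  PySem.Dict.getD c "inconsistent_light" 0 + PySem.Dict.getD c "inconsistent_dark" 0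
    + PySem.Dict.getD c "rule_mismatch_issue" 0

def sum_counts_pagewise_py_alt (cons_by_key : List (String × List (String × List (String × Int)))) : List (String × Int) :=
  let pages := cons_by_key.map (·.2)
  [("consistent_issue", pvField pages "consistent"),
   ("inconsistent_light_issue", pvField pages "inconsistent_light"),
   ("inconsistent_dark_issue", pvField pages "inconsistent_dark"),
   ("rule_mismatch_issue", pvField pages "rule_mismatch_issue"),
   ("pages_with_inconsistency",
     (pages.map (fun cons => if pvIncOf cons > 0 then (1 : Int) else 0)).sum)]

-- ===== PRECONDITION & SPEC =====
def Spec_sum_counts_pagewise_py (cons_by_key : List (String × List (String × List (String × Int)))) (out : List (String × Int)) : Prop := out = sum_counts_pagewise_py_alt cons_by_key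
instance (cons_by_key : List (String × List (String × List (String × Int)))) (out : List (String × Int)) : Decidable (Spec_sum_counts_pagewise_py cons_by_key out) := by unfold Spec_sum_counts_pagewise_py; infer_instance

-- ===== CLAIM (what is proved, stated in full; the proofs are below) =====
def Claim_equal_sum_counts_pagewise_py : Prop := ∀ (cons_by_key : List (String × List (String × List (String × Int)))), Dom_sum_counts_pagewise_py cons_by_key → Spec_sum_counts_pagewise_py cons_by_key (sum_counts_pagewise_py cons_by_key)

-- ===== LEMMAS AND PROOFS =====

-- One step of A's loop on a totals dict of exactly the five keys updates the five values in place.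
lemma pvStepA_eq (a b c d e : Int) (kv : String × List (String × List (String × Int))) :
    pvStepA (PySem.Dict.mk [("consistent_issue", a), ("inconsistent_light_issue", b),
      ("inconsistent_dark_issue", c), ("rule_mismatch_issue", d),
      ("pages_with_inconsistency", e)]) kv
    = PySem.Dict.mk [("consistent_issue", a + PySem.Dict.getD (pvCountsOf kv.2) "consistent" 0),
      ("inconsistent_light_issue", b + PySem.Dict.getD (pvCountsOf kv.2) "inconsistent_light" 0),
      ("inconsistent_dark_issue", c + PySem.Dict.getD (pvCountsOf kv.2) "inconsistent_dark" 0),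
      ("rule_mismatch_issue", d + PySem.Dict.getD (pvCountsOf kv.2) "rule_mismatch_issue" 0),
      ("pages_with_inconsistency", e + (if pvIncOf kv.2 > 0 then 1 else 0))] := by
  have key : ∀ (cd : PySem.Dict String Int) (inc : Int),
      (let totals : PySem.Dict String Int := PySem.Dict.mk [("consistent_issue", a),
         ("inconsistent_light_issue", b), ("inconsistent_dark_issue", c),
         ("rule_mismatch_issue", d), ("pages_with_inconsistency", e)]
       let t1 := if inc > 0 then
           PySem.Dict.insert totals "pages_with_inconsistency"
             (PySem.Dict.getD totals "pages_with_inconsistency" 0 + 1)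
         else totals
       let t2 := PySem.Dict.insert t1 "consistent_issue"
           (PySem.Dict.getD t1 "consistent_issue" 0 + PySem.Dict.getD cd "consistent" 0)
       let t3 := PySem.Dict.insert t2 "inconsistent_light_issue"
           (PySem.Dict.getD t2 "inconsistent_light_issue" 0 + PySem.Dict.getD cd "inconsistent_light" 0)
       let t4 := PySem.Dict.insert t3 "inconsistent_dark_issue"
           (PySem.Dict.getD t3 "inconsistent_dark_issue" 0 + PySem.Dict.getD cd "inconsistent_dark" 0)
       PySem.Dict.insert t4 "rule_mismatch_issue"
           (PySem.Dict.getD t4 "rule_mismatch_issue" 0 + PySem.Dict.getD cd "rule_mismatch_issue" 0))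
      = PySem.Dict.mk [("consistent_issue", a + PySem.Dict.getD cd "consistent" 0),
        ("inconsistent_light_issue", b + PySem.Dict.getD cd "inconsistent_light" 0),
        ("inconsistent_dark_issue", c + PySem.Dict.getD cd "inconsistent_dark" 0),
        ("rule_mismatch_issue", d + PySem.Dict.getD cd "rule_mismatch_issue" 0),
        ("pages_with_inconsistency", e + (if inc > 0 then 1 else 0))] := by
    intro cd inc
    by_cases h : inc > 0 <;>
      simp [h, PySem.Dict.insert, PySem.Dict.getD, PySem.Dict.get?, PySem.Dict.contains]
  exact key (pvCountsOf kv.2) (pvIncOf kv.2)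

lemma foldA_eq (l : List (String × List (String × List (String × Int)))) :
    ∀ (a b c d e : Int),
    l.foldl pvStepA (PySem.Dict.mk [("consistent_issue", a), ("inconsistent_light_issue", b),
      ("inconsistent_dark_issue", c), ("rule_mismatch_issue", d),
      ("pages_with_inconsistency", e)])
    = PySem.Dict.mk [("consistent_issue", a + pvField (l.map (·.2)) "consistent"),
      ("inconsistent_light_issue", b + pvField (l.map (·.2)) "inconsistent_light"),
      ("inconsistent_dark_issue", c + pvField (l.map (·.2)) "inconsistent_dark"),
      ("rule_mismatch_issue", d + pvField (l.map (·.2)) "rule_mismatch_issue"),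
      ("pages_with_inconsistency",
        e + ((l.map (·.2)).map (fun cons => if pvIncOf cons > 0 then (1 : Int) else 0)).sum)] := by
  induction l with
  | nil => intro a b c d e; simp [pvField]
  | cons x xs ih =>
    intro a b c d e
    rw [List.foldl_cons, pvStepA_eq, ih]
    simp [pvField, add_assoc]

-- ===== VERDICT (by name: the statement is the Claim_ definition above) =====
theorem sum_counts_pagewise_py_spec : Claim_equal_sum_counts_pagewise_py := by
  intro cbk _
  show sum_counts_pagewise_py cbk = sum_counts_pagewise_py_alt cbk
  unfold sum_counts_pagewise_py sum_counts_pagewise_py_alt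
  rw [foldA_eq]
  simp
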